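-- pv_equiv track=rewrite | github.com/joshanashakya/dissertation | workspace/dataset/java-python/GeeksForGeeks/2981/A/2.py | countDecreasing
-- ===== SOURCE A (Python) =====
-- def countDecreasing(A, n):
--
--     cnt = 0 # Initialize result
--
--     # Initialize length of current
--     # decreasing subarray
--     len = 1
--
--     # Traverse through the array
--     for i in range (n - 1) :
--
--         # If arr[i+1] is less than arr[i],
--         # then increment length
--         if (A[i + 1] < A[i]):
--             len += 1
--
--         # Else Update count and
--         # reset length
--         else :
--             cnt += (((len - 1) * len) // 2);
--             len = 1
--
--     # If last length is more than 1
--     if (len > 1):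
--         cnt += (((len - 1) * len) // 2)
--
--     return cnt
-- ===== SOURCE B (Python) =====
-- def countDecreasing(A, n):
--     # Incremental pair counting: each extension of a decreasing run of length
--     # `run` contributes `run` new pairs, so no closed form or final flush is needed.
--     prefix = A[:n] if n > 0 else []
--     cnt = 0
--     run = 1
--     for prev, cur in zip(prefix, prefix[1:]):
--         if cur < prev:
--             cnt += run
--             run += 1
--         else:
--             run = 1
--     return cnt
-- ===== Notes on version B (the rewrite author's own statement) =====
-- stated objective: alternative
-- what changed: Replaces A's index loop with per-run triangular closed form ((len-1)*len)//2 and a trailing flush by a zip over adjacent pairs of the length-n prefix that accumulates pair counts incrementally (cnt += run on each extension), needing no closed form and no final flush.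
import Mathlib
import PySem

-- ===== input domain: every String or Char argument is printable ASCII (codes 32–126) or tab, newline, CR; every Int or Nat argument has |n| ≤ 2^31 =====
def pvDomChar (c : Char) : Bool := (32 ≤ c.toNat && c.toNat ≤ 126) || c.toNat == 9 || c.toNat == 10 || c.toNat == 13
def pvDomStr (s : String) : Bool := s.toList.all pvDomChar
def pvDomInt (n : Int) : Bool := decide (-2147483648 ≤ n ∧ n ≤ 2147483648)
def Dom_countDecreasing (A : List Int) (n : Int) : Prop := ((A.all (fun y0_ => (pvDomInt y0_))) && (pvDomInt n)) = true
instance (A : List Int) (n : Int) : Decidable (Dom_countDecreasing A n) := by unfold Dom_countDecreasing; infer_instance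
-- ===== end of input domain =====

-- B replaces A's per-run triangular closed form (and the trailing flush) by incremental
-- pair accumulation over adjacent pairs of the length-n prefix (objective: alternative).

-- ===== PORT A =====
-- literal port of A: index loop over range(n-1), closed-form run flush
def countDecreasing (A : List Int) (n : Int) : Int :=
  let s := (PySem.List.pyRange 0 (n - 1) 1).foldl
    (fun (p : Int × Int) i =>
      if PySem.List.pyGetD A (i + 1) 0 < PySem.List.pyGetD A i 0 then (p.1, p.2 + 1)
      else (p.1 + PySem.Int.floordiv ((p.2 - 1) * p.2) 2, 1)) (0, 1)
  if s.2 > 1 then s.1 + PySem.Int.floordiv ((s.2 - 1) * s.2) 2 else s.1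

-- ===== PORT B =====
-- literal port of Source B: zip the prefix with its tail, add `run` on each extension
def countDecreasing_alt (A : List Int) (n : Int) : Int :=
  let pfx := if n > 0 then PySem.List.slice A none (some n) else []
  let s := (pfx.zip (PySem.List.slice pfx (some 1) none)).foldl
    (fun (p : Int × Int) q =>
      if q.2 < q.1 then (p.1 + p.2, p.2 + 1) else (p.1, 1)) (0, 1)
  s.1

-- ===== PRECONDITION & SPEC =====
-- A raises IndexError when 2 ≤ n and n exceeds the list length; exactly those inputs are excluded.
def Pre_countDecreasing (A : List Int) (n : Int) : Prop := n ≤ (A.length : Int) ∨ n ≤ 1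
instance (A : List Int) (n : Int) : Decidable (Pre_countDecreasing A n) := by unfold Pre_countDecreasing; infer_instance
def pvWitness_countDecreasing : List Int × Int := ([5, 3, 2, 4, 1], 5)

def Spec_countDecreasing (A : List Int) (n : Int) (out : Int) : Prop := out = countDecreasing_alt A n
instance (A : List Int) (n : Int) (out : Int) : Decidable (Spec_countDecreasing A n out) := by unfold Spec_countDecreasing; infer_instance

-- ===== CLAIM (what is proved, stated in full; the proofs are below) =====
def Claim_equal_countDecreasing : Prop := ∀ (A : List Int) (n : Int), Dom_countDecreasing A n → Pre_countDecreasing A n → Spec_countDecreasing A n (countDecreasing A n)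

-- ===== LEMMAS AND PROOFS =====

-- triangular number step: (l-1)l/2 + l = l(l+1)/2
lemma tri_step (l : Int) :
    PySem.Int.floordiv ((l - 1) * l) 2 + l = PySem.Int.floordiv ((l + 1 - 1) * (l + 1)) 2 := by
  rw [PySem.Int.floordiv_eq_ediv_of_pos (by norm_num), PySem.Int.floordiv_eq_ediv_of_pos (by norm_num)]
  have h : (l + 1 - 1) * (l + 1) = (l - 1) * l + l * 2 := by ring
  rw [h, Int.add_mul_ediv_right _ _ (by norm_num)]

-- core invariant: A's fold-then-flush equals B's incremental fold, over any pair list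
lemma core (ps : List (Int × Int)) (c l : Int) (hl : 1 ≤ l) :
    (let s := ps.foldl
        (fun (p : Int × Int) q =>
          if q.2 < q.1 then (p.1, p.2 + 1)
          else (p.1 + PySem.Int.floordiv ((p.2 - 1) * p.2) 2, 1)) (c, l)
     if s.2 > 1 then s.1 + PySem.Int.floordiv ((s.2 - 1) * s.2) 2 else s.1) =
    (ps.foldl
        (fun (p : Int × Int) q =>
          if q.2 < q.1 then (p.1 + p.2, p.2 + 1) else (p.1, 1))
        (c + PySem.Int.floordiv ((l - 1) * l) 2, l)).1 := by
  induction ps generalizing c l with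
  | nil =>
    simp only [List.foldl_nil]
    by_cases h : l > 1
    · simp [h]
    · have h1 : l = 1 := by omega
      simp only [h, if_false]
      subst h1; norm_num [PySem.Int.floordiv]
  | cons q ps ih =>
    simp only [List.foldl_cons]
    by_cases h : q.2 < q.1
    · simp only [h, if_true]
      have := ih c (l + 1) (by omega)
      rw [this, ← tri_step, add_assoc]
    · simp only [h, if_false]
      have := ih (c + PySem.Int.floordiv ((l - 1) * l) 2) 1 le_rfl
      simpa using this

-- index pairs read through pyGetD over range(m) = the first m adjacent pairs of A
lemma map_pairs (A : List Int) (m : Nat) (h : m + 1 ≤ A.length) :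
    (PySem.List.pyRange 0 (m : Int) 1).map
        (fun i => (PySem.List.pyGetD A i 0, PySem.List.pyGetD A (i + 1) 0)) =
      (A.zip (A.drop 1)).take m := by
  apply List.ext_getElem
  · simp [PySem.List.length_pyRange_one]
    omega
  · intro k h1 h2
    have hk : k < m := by
      simpa [PySem.List.length_pyRange_one] using h1
    have hrk : (PySem.List.pyRange 0 (m : Int) 1)[k]'(by simpa [PySem.List.length_pyRange_one] using h1) = (k : Int) := by
      rw [PySem.List.getElem_pyRange_one]; ring
    simp only [List.getElem_map, hrk, List.getElem_take, List.getElem_zip, List.getElem_drop]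
    simp only [Prod.mk.injEq]
    refine ⟨?_, ?_⟩
    · rw [show ((k : Int)) = ((k : Nat) : Int) from rfl, PySem.List.pyGetD_natCast]
      exact List.getD_eq_getElem _ _ (by omega)
    · rw [show ((k : Int) + 1) = ((k + 1 : Nat) : Int) by push_cast; ring, PySem.List.pyGetD_natCast]
      refine (List.getD_eq_getElem _ _ (by omega)).trans ?_
      congr 1
      omega

-- zipping a prefix with its own tail = truncating the global adjacent-pair list
lemma zip_take (A : List Int) (j : Nat) :
    (A.take j).zip ((A.take j).drop 1) = (A.zip (A.drop 1)).take (j - 1) := by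
  apply List.ext_getElem
  · simp; omega
  · intro k h1 h2
    simp only [List.getElem_take, List.getElem_zip, List.getElem_drop]
  
-- ===== VERDICT (by name: the statement is the Claim_ definition above) =====
theorem countDecreasing_spec : Claim_equal_countDecreasing := by
  intro A n _ hpre
  simp only [Spec_countDecreasing, countDecreasing, countDecreasing_alt]
  by_cases hn : n ≤ 1
  · rw [PySem.List.pyRange_one_eq_nil (by omega)]
    have hpfx : (if n > 0 then PySem.List.slice A none (some n) else []).length ≤ 1 := by
      by_cases hp : n > 0
      · rw [if_pos hp, PySem.List.slice_to A (by omega)]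
        simp; omega
      · rw [if_neg hp]; simp
    rw [PySem.List.slice_from _ (by norm_num : (0:Int) ≤ 1)]
    rw [show ((1 : Int)).toNat = 1 from rfl, List.drop_eq_nil_of_le hpfx, List.zip_nil_right]
    simp
  · have hlen : n ≤ (A.length : Int) := by
      rcases hpre with h | h
      · exact h
      · omega
    set m : Nat := (n - 1).toNat with hm
    have hmn : (n - 1) = (m : Int) := by omega
    have hmlen : m + 1 ≤ A.length := by omega
    have hA : (PySem.List.pyRange 0 (m : Int) 1).foldl
        (fun (p : Int × Int) i =>
          if PySem.List.pyGetD A (i + 1) 0 < PySem.List.pyGetD A i 0 then (p.1, p.2 + 1)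
          else (p.1 + PySem.Int.floordiv ((p.2 - 1) * p.2) 2, 1)) (0, 1) =
        ((A.zip (A.drop 1)).take m).foldl
        (fun (p : Int × Int) q =>
          if q.2 < q.1 then (p.1, p.2 + 1)
          else (p.1 + PySem.Int.floordiv ((p.2 - 1) * p.2) 2, 1)) (0, 1) := by
      rw [← map_pairs A m hmlen, List.foldl_map]
    rw [hmn, hA]
    rw [if_pos (show n > 0 by omega), PySem.List.slice_to A (by omega),
        PySem.List.slice_from _ (by norm_num : (0:Int) ≤ 1)]
    rw [show ((1 : Int)).toNat = 1 from rfl, zip_take A n.toNat,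
        show n.toNat - 1 = m from by omega]
    have h0 : PySem.Int.floordiv ((1 - 1) * 1) 2 = 0 := rfl
    have hc := core ((A.zip (A.drop 1)).take m) 0 1 le_rfl
    rw [h0, add_zero] at hc
    exact hc
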